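-- pv_equiv track=rewrite | github.com/mikhailmartin/Yandex-AlgorithmTraining1.0 | HomeWork5/F_conditioners.py | preprocessed
-- ===== SOURCE A (Python) =====
-- def preprocessed(old_power_price: list[tuple[int, int]]) -> list[tuple[int, int]]:
--
--     old_power_price = sorted(old_power_price, reverse=True)
--     for i in range(1, len(old_power_price)):
--         current_power, current_price = old_power_price[i]
--         previous_power, previous_price = old_power_price[i - 1]
--         old_power_price[i] = (current_power, min(current_price, previous_price))
--
--     old_power_price = sorted(old_power_price)
--     new_power_price = [old_power_price[0]]
--     previous_power = old_power_price[0][0]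
--     for power, price in old_power_price:
--         if power != previous_power:
--             new_power_price.append((power, price))
--             previous_power = power
--
--     return new_power_price
-- ===== SOURCE B (Python) =====
-- def preprocessed(old_power_price: list[tuple[int, int]]) -> list[tuple[int, int]]:
--     # best price seen for each power
--     best = {}
--     for power, price in old_power_price:
--         if power not in best or price < best[power]:
--             best[power] = price
--     powers = sorted({power for power, _ in old_power_price}, reverse=True)
--     running = best[powers[0]]  # IndexError on empty input, like the original
--     result = []
--     for power in powers:
--         running = min(running, best[power])
--         result.append((power, running))
--     result.reverse()
--     return result
-- ===== Notes on version B (the rewrite author's own statement) =====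
-- stated objective: idiomatic
-- what changed: Replaces A's two full sorts, in-place index-loop prefix-min and dedup pass with a dict of per-power minimum prices plus one running-min sweep over the distinct powers sorted descending, reversed at the end.
import Mathlib
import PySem

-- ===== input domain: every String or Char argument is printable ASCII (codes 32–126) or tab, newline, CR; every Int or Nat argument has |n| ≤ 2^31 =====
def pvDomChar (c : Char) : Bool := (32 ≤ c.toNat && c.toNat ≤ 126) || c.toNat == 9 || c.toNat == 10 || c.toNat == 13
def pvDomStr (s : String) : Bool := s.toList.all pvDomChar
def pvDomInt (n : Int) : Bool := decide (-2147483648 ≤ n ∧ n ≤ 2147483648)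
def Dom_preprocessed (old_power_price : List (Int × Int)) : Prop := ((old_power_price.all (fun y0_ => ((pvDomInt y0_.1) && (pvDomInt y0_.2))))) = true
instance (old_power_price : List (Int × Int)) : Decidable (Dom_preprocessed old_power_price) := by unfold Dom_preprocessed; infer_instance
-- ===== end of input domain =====

-- B replaces A's double sort + in-place prefix-min + dedup pass with a per-power
-- minimum dict and one descending running-min sweep (same O(n log n) cost, plainer).

-- ===== PORT A =====
def preprocessed (old_power_price : List (Int × Int)) : List (Int × Int) :=
  let s1 := PySem.List.sorted2 old_power_price Prod.fst Prod.snd true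
  let s2 := (PySem.List.pyRange 1 (PySem.List.len s1)).foldl
      (fun l i =>
        match PySem.List.pyGet? l i, PySem.List.pyGet? l (i - 1) with
        | some cur, some prev => l.set i.toNat (cur.1, min cur.2 prev.2)
        | _, _ => l) s1
  let s3 := PySem.List.sorted2 s2 Prod.fst Prod.snd false
  match s3 with
  | [] => []   -- Python raises IndexError here; excluded by Pre_preprocessed
  | first :: _ =>
      (s3.foldl
        (fun (st : List (Int × Int) × Int) e =>
          if e.1 ≠ st.2 then (st.1 ++ [e], e.1) else st)
        ([first], first.1)).1

-- ===== PORT B =====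
def preprocessed_alt (old_power_price : List (Int × Int)) : List (Int × Int) :=
  let best := old_power_price.foldl
      (fun (d : PySem.Dict Int Int) e =>
        if !d.contains e.1 || e.2 < d.getD e.1 0 then d.insert e.1 e.2 else d)
      PySem.Dict.empty
  let powers := PySem.List.sorted (PySem.Set.ofList (old_power_price.map Prod.fst)) (fun p => p) true
  match powers with
  | [] => []   -- Python raises IndexError here; excluded by Pre_preprocessed
  | p0 :: _ =>
      ((powers.foldl
          (fun (st : List (Int × Int) × Int) p =>
            let r := min st.2 (best.getD p 0)
            (st.1 ++ [(p, r)], r))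
          ([], best.getD p0 0)).1).reverse

-- ===== PRECONDITION & SPEC =====
-- Python A (and B) raises IndexError on the empty list (indexing element 0); only that input is excluded.
def Pre_preprocessed (old_power_price : List (Int × Int)) : Prop := old_power_price ≠ []
instance (old_power_price : List (Int × Int)) : Decidable (Pre_preprocessed old_power_price) := by unfold Pre_preprocessed; infer_instance
def pvWitness_preprocessed : (List (Int × Int)) := [(1, 5), (2, 3), (1, 4)]
def Spec_preprocessed (old_power_price : List (Int × Int)) (out : List (Int × Int)) : Prop := out = preprocessed_alt old_power_price
instance (old_power_price : List (Int × Int)) (out : List (Int × Int)) : Decidable (Spec_preprocessed old_power_price out) := by unfold Spec_preprocessed; infer_instance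

-- ===== CLAIM (what is proved, stated in full; the proofs are below) =====
def Claim_equal_preprocessed : Prop := ∀ (old_power_price : List (Int × Int)), Dom_preprocessed old_power_price → Pre_preprocessed old_power_price → Spec_preprocessed old_power_price (preprocessed old_power_price)

-- ===== LEMMAS AND PROOFS =====

-- the Bool comparator PySem.List.sorted2 uses for keys (Prod.fst, Prod.snd): lexicographic "<"
def pltB (a b : Int × Int) : Bool := decide (a.1 < b.1) || (!decide (b.1 < a.1) && decide (a.2 < b.2))

theorem sorted2_desc_eq (xs : List (Int × Int)) :
    PySem.List.sorted2 xs Prod.fst Prod.snd true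
      = xs.foldl (fun acc x => PySem.List.insertBy (fun a b => pltB b a) x acc) [] := rfl

theorem sorted2_asc_eq (xs : List (Int × Int)) :
    PySem.List.sorted2 xs Prod.fst Prod.snd false
      = xs.foldl (fun acc x => PySem.List.insertBy pltB x acc) [] := rfl

theorem pltB_asym (x y : Int × Int) : pltB x y = true → pltB y x = false := by
  simp only [pltB, Bool.or_eq_true, Bool.and_eq_true, Bool.not_eq_true', Bool.or_eq_false_iff,
    Bool.and_eq_false_iff, decide_eq_true_eq, decide_eq_false_iff_not, Bool.not_eq_false',
    Bool.not_eq_true]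
  omega

theorem pltB_trans' (x y z : Int × Int) : pltB x y = true → pltB z y = false → pltB z x = false := by
  simp only [pltB, Bool.or_eq_true, Bool.and_eq_true, Bool.not_eq_true', Bool.or_eq_false_iff,
    Bool.and_eq_false_iff, decide_eq_true_eq, decide_eq_false_iff_not, Bool.not_eq_false',
    Bool.not_eq_true]
  omega

theorem pltB_antisymm (a b : Int × Int) : pltB a b = false → pltB b a = false → a = b := by
  simp only [pltB, Bool.or_eq_false_iff, Bool.and_eq_false_iff, decide_eq_false_iff_not,
    Bool.not_eq_false', decide_eq_true_eq, Bool.not_eq_true]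
  intro h1 h2
  have : a.1 = b.1 ∧ a.2 = b.2 := by omega
  exact Prod.ext this.1 this.2

theorem pltB_false_fst (a b : Int × Int) : pltB a b = false → b.1 ≤ a.1 := by
  simp only [pltB, Bool.or_eq_false_iff, Bool.and_eq_false_iff, decide_eq_false_iff_not,
    Bool.not_eq_false', decide_eq_true_eq, Bool.not_eq_true]
  omega

theorem pltB_false_of (a b : Int × Int) : b.1 ≤ a.1 → b.2 ≤ a.2 → pltB a b = false := by
  intro h1 h2
  simp only [pltB, Bool.or_eq_false_iff, Bool.and_eq_false_iff, decide_eq_false_iff_not,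
    Bool.not_eq_false', decide_eq_true_eq, Bool.not_eq_true]
  omega

theorem pltB_flip_trans' (x y z : Int × Int) : pltB y x = true → pltB y z = false → pltB x z = false := by
  simp only [pltB, Bool.or_eq_true, Bool.and_eq_true, Bool.not_eq_true', Bool.or_eq_false_iff,
    Bool.and_eq_false_iff, decide_eq_true_eq, decide_eq_false_iff_not, Bool.not_eq_false']
  omega

theorem insertBy_pairwise {α : Type} (c : α → α → Bool)
    (hA : ∀ x y, c x y = true → c y x = false)
    (hH : ∀ x y z, c x y = true → c z y = false → c z x = false)
    (x : α) (acc : List α) (h : acc.Pairwise (fun a b => c b a = false)) :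
    (PySem.List.insertBy c x acc).Pairwise (fun a b => c b a = false) := by
  induction acc with
  | nil => simp [PySem.List.insertBy]
  | cons y ys ih =>
    rw [List.pairwise_cons] at h
    obtain ⟨hy, hys⟩ := h
    by_cases hc : c x y = true
    · simp only [PySem.List.insertBy, hc, if_true]
      refine List.Pairwise.cons ?_ (List.Pairwise.cons hy hys)
      intro z hz
      rcases List.mem_cons.mp hz with rfl | hz'
      · exact hA x z hc
      · exact hH x y z hc (hy z hz')
    · have hc' : c x y = false := by simpa using hc
      have : PySem.List.insertBy c x (y :: ys) = y :: PySem.List.insertBy c x ys := by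
        simp [PySem.List.insertBy, hc']
      rw [this]
      refine List.Pairwise.cons ?_ (ih hys)
      intro z hz
      rcases (PySem.List.mem_insertBy c x z ys).mp hz with rfl | hz'
      · exact hc'
      · exact hy z hz'

theorem foldl_insertBy_pairwise {α : Type} (c : α → α → Bool)
    (hA : ∀ x y, c x y = true → c y x = false)
    (hH : ∀ x y z, c x y = true → c z y = false → c z x = false)
    (xs : List α) : ∀ (acc : List α), acc.Pairwise (fun a b => c b a = false) →
    (xs.foldl (fun a x => PySem.List.insertBy c x a) acc).Pairwise (fun a b => c b a = false) := by
  induction xs with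
  | nil => intro acc h; simpa using h
  | cons x t ih =>
    intro acc h
    simpa using ih _ (insertBy_pairwise c hA hH x acc h)

theorem asc_unique (u v : List (Int × Int)) (hperm : u.Perm v)
    (hu : u.Pairwise (fun a b => pltB b a = false)) (hv : v.Pairwise (fun a b => pltB b a = false)) :
    u = v :=
  List.Perm.eq_of_pairwise (fun a b _ _ h1 h2 => pltB_antisymm a b h2 h1) hu hv hperm

-- the intended value: minimum price among entries of power >= p
def smv (xs : List (Int × Int)) (p : Int) : Int :=
  match (xs.filter (fun e => decide (p ≤ e.1))).map Prod.snd with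
  | [] => 0
  | h :: t => t.foldl min h

theorem smv_mem (xs : List (Int × Int)) (p : Int) (h : ∃ e ∈ xs, p ≤ e.1) :
    ∃ e ∈ xs, p ≤ e.1 ∧ smv xs p = e.2 := by
  obtain ⟨e, he, hpe⟩ := h
  have hef : e ∈ xs.filter (fun e => decide (p ≤ e.1)) := by
    simp [List.mem_filter, he, hpe]
  unfold smv
  rcases hl : (xs.filter (fun e => decide (p ≤ e.1))).map Prod.snd with _ | ⟨h0, t0⟩
  all_goals rw [hl]
  · exfalso
    have : e.2 ∈ (xs.filter (fun e => decide (p ≤ e.1))).map Prod.snd := List.mem_map_of_mem hef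
    rw [hl] at this; exact absurd this (List.not_mem_nil)
  · have hmem : t0.foldl min h0 ∈ h0 :: t0 := by
      rcases PySem.List.foldl_min_mem t0 h0 with h' | h'
      · rw [h']; exact List.mem_cons_self
      · exact List.mem_cons_of_mem _ h'
    rw [← hl] at hmem
    obtain ⟨f, hf, hfs⟩ := List.mem_map.mp hmem
    have hf' := List.mem_filter.mp hf
    exact ⟨f, hf'.1, by simpa using hf'.2, hfs.symm⟩

theorem smv_le (xs : List (Int × Int)) (p : Int) : ∀ e ∈ xs, p ≤ e.1 → smv xs p ≤ e.2 := by
  intro e he hpe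
  have hef : e.2 ∈ (xs.filter (fun e => decide (p ≤ e.1))).map Prod.snd :=
    List.mem_map_of_mem (by simp [List.mem_filter, he, hpe])
  unfold smv
  rcases hl : (xs.filter (fun e => decide (p ≤ e.1))).map Prod.snd with _ | ⟨h0, t0⟩
  all_goals rw [hl]
  · rw [hl] at hef; exact absurd hef (List.not_mem_nil)
  · rw [hl] at hef
    rcases List.mem_cons.mp hef with rfl | h'
    · exact (PySem.List.foldl_min_le t0 e.2).1
    · exact (PySem.List.foldl_min_le t0 h0).2 _ h'

-- two strictly increasing integer lists with the same members are equal
theorem sortedLt_eq (l₁ : List Int) : ∀ (l₂ : List Int),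
    l₁.Pairwise (· < ·) → l₂.Pairwise (· < ·) → (∀ x, x ∈ l₁ ↔ x ∈ l₂) → l₁ = l₂ := by
  induction l₁ with
  | nil =>
    intro l₂ _ _ hm
    rcases l₂ with _ | ⟨b, t₂⟩
    · rfl
    · exact absurd ((hm b).mpr List.mem_cons_self) (List.not_mem_nil)
  | cons a t₁ ih =>
    intro l₂ h₁ h₂ hm
    rcases l₂ with _ | ⟨b, t₂⟩
    · exact absurd ((hm a).mp List.mem_cons_self) (List.not_mem_nil)
    · rw [List.pairwise_cons] at h₁ h₂
      have hab : a = b := by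
        have ha : a ∈ b :: t₂ := (hm a).mp List.mem_cons_self
        have hb : b ∈ a :: t₁ := (hm b).mpr List.mem_cons_self
        rcases List.mem_cons.mp ha with h | h
        · exact h
        · rcases List.mem_cons.mp hb with h' | h'
          · exact h'.symm
          · have := h₂.1 a h; have := h₁.1 b h'; omega
      subst hab
      congr 1
      refine ih t₂ h₁.2 h₂.2 (fun x => ⟨fun hx => ?_, fun hx => ?_⟩)
      · have := h₁.1 x hx
        rcases List.mem_cons.mp ((hm x).mp (List.mem_cons_of_mem _ hx)) with rfl | h
        · omega
        · exact h
      · have := h₂.1 x hx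
        rcases List.mem_cons.mp ((hm x).mpr (List.mem_cons_of_mem _ hx)) with rfl | h
        · omega
        · exact h

def dpost : Int → List (Int × Int) → List (Int × Int)
  | _, [] => []
  | m, e :: t => (e.1, min e.2 m) :: dpost (min e.2 m) t

def dscan : Int → List (Int × Int) → List (Int × Int)
  | _, [] => []
  | prev, e :: t => if e.1 ≠ prev then e :: dscan e.1 t else dscan prev t

def dpow : Int → List Int → List Int
  | _, [] => []
  | prev, p :: t => if p ≠ prev then p :: dpow p t else dpow prev t

def sweepF (g : Int → Int) : Int → List Int → List (Int × Int)
  | _, [] => []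
  | a, p :: t => (p, min a (g p)) :: sweepF g (min a (g p)) t

-- A's index loop is dpost
theorem loopA_eq (t : List (Int × Int)) : ∀ (pre : List (Int × Int)) (a : Int × Int),
    (PySem.List.pyRange ((pre.length : Int) + 1) ((pre.length : Int) + 1 + t.length)).foldl
      (fun l i =>
        match PySem.List.pyGet? l i, PySem.List.pyGet? l (i - 1) with
        | some cur, some prev => l.set i.toNat (cur.1, min cur.2 prev.2)
        | _, _ => l) (pre ++ a :: t)
      = pre ++ a :: dpost a.2 t := by
  induction t with
  | nil =>
    intro pre a
    have h0 : ((pre.length : Int) + 1 + (List.length ([] : List (Int × Int)) : Int)) = (pre.length : Int) + 1 := by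
      simp
    rw [h0]
    simp [pysem, dpost]
  | cons b t' ih =>
    intro pre a
    have hlt : ((pre.length : Int) + 1) < (pre.length : Int) + 1 + ((b :: t').length : Int) := by
      simp only [List.length_cons]; push_cast; omega
    rw [PySem.List.pyRange_one_cons hlt, List.foldl_cons]
    have hcast : ((pre.length : Int) + 1) = ((pre.length + 1 : Nat) : Int) := by push_cast; ring
    have hget1 : PySem.List.pyGet? (pre ++ a :: b :: t') ((pre.length : Int) + 1) = some b := by
      rw [hcast, PySem.List.pyGet?_natCast]
      rw [List.getElem?_append_right (by omega)]
      simp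
    have hget0 : PySem.List.pyGet? (pre ++ a :: b :: t') ((pre.length : Int) + 1 - 1) = some a := by
      have : ((pre.length : Int) + 1 - 1) = ((pre.length : Nat) : Int) := by ring
      rw [this, PySem.List.pyGet?_natCast]
      rw [List.getElem?_append_right (by omega)]
      simp
    rw [hget1, hget0]
    rw [show (match some b, some a with
      | some cur, some prev => (pre ++ a :: b :: t').set ((pre.length : Int) + 1).toNat (cur.1, min cur.2 prev.2)
      | _, _ => pre ++ a :: b :: t') = (pre ++ a :: b :: t').set ((pre.length : Int) + 1).toNat (b.1, min b.2 a.2) from rfl]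
    have htn : (((pre.length : Int) + 1)).toNat = pre.length + 1 := by omega
    have hset : (pre ++ a :: b :: t').set ((pre.length : Int) + 1).toNat (b.1, min b.2 a.2)
        = (pre ++ [a]) ++ (b.1, min b.2 a.2) :: t' := by
      rw [htn, List.set_append_right _ _ (by omega)]
      have : pre.length + 1 - pre.length = 1 := by omega
      rw [this]
      simp
    rw [hset]
    have hlen2 : ((pre.length : Int) + 1 + ((b :: t').length : Int)) = ((pre ++ [a]).length : Int) + 1 + (t'.length : Int) := by
      simp only [List.length_cons, List.length_append, List.length_nil]; push_cast; ring
    have hstart : ((pre.length : Int) + 1 + 1) = ((pre ++ [a]).length : Int) + 1 := by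
      simp only [List.length_cons, List.length_append, List.length_nil]; push_cast; ring
    rw [hlen2, hstart, ih (pre ++ [a]) (b.1, min b.2 a.2)]
    simp [dpost]

theorem loopScan_eq (l : List (Int × Int)) : ∀ (acc : List (Int × Int)) (prev : Int),
    (l.foldl (fun (st : List (Int × Int) × Int) e =>
        if e.1 ≠ st.2 then (st.1 ++ [e], e.1) else st) (acc, prev)).1
      = acc ++ dscan prev l := by
  induction l with
  | nil => intro acc prev; simp [dscan]
  | cons e t ih =>
    intro acc prev
    rw [List.foldl_cons, dscan]
    by_cases h : e.1 = prev
    · have hc : ¬ (e.1 ≠ prev) := by simp [h]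
      rw [if_neg hc, if_neg hc, ih]
    · rw [if_pos h, if_pos h, ih]
      simp

theorem loopSweep_eq (g : Int → Int) (l : List Int) : ∀ (acc : List (Int × Int)) (a : Int),
    (l.foldl (fun (st : List (Int × Int) × Int) p =>
        (st.1 ++ [(p, min st.2 (g p))], min st.2 (g p))) (acc, a)).1
      = acc ++ sweepF g a l := by
  induction l with
  | nil => intro acc a; simp [sweepF]
  | cons p t ih =>
    intro acc a
    simp only [List.foldl_cons, sweepF]
    rw [ih]
    simp [List.append_assoc]

theorem dpost_map_fst (t : List (Int × Int)) : ∀ m, (dpost m t).map Prod.fst = t.map Prod.fst := by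
  induction t with
  | nil => intro m; simp [dpost]
  | cons e t ih => intro m; simp [dpost, ih]

theorem dpost_snd_le (t : List (Int × Int)) : ∀ m, ∀ e ∈ dpost m t, e.2 ≤ m := by
  induction t with
  | nil => intro m e he; simp [dpost] at he
  | cons f t ih =>
    intro m e he
    simp only [dpost, List.mem_cons] at he
    rcases he with rfl | he
    · simp
    · have := ih _ e he; omega

theorem dpost_pairwise (t : List (Int × Int)) : ∀ m,
    t.Pairwise (fun a b => b.1 ≤ a.1) → (dpost m t).Pairwise (fun a b => pltB a b = false) := by
  induction t with
  | nil => intro m _; simp [dpost]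
  | cons f t ih =>
    intro m h
    rw [List.pairwise_cons] at h
    refine List.Pairwise.cons ?_ (ih _ h.2)
    intro e he
    refine pltB_false_of _ _ ?_ ?_
    · have : e.1 ∈ (dpost (min f.2 m) t).map Prod.fst := List.mem_map_of_mem he
      rw [dpost_map_fst] at this
      obtain ⟨g, hg, hge⟩ := List.mem_map.mp this
      rw [← hge]; exact h.1 g hg
    · have := dpost_snd_le t (min f.2 m) e he
      simp only at this ⊢
      omega

-- dpost: each element's price is the min of the original prices up to it
theorem dpost_split (t : List (Int × Int)) : ∀ (m : Int) (u : List (Int × Int)) (e : Int × Int) (v : List (Int × Int)),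
    dpost m t = u ++ e :: v →
    ∃ u' e' v', t = u' ++ e' :: v' ∧ u'.map Prod.fst = u.map Prod.fst ∧ e'.1 = e.1 ∧
      v'.map Prod.fst = v.map Prod.fst ∧ e.2 = ((u' ++ [e']).map Prod.snd).foldl min m := by
  induction t with
  | nil =>
    intro m u e v h
    simp [dpost] at h
  | cons b t' ih =>
    intro m u e v h
    rw [dpost] at h
    rcases u with _ | ⟨c, u₁⟩
    · simp only [List.nil_append, List.cons.injEq] at h
      refine ⟨[], b, t', by simp, by simp, ?_, ?_, ?_⟩
      · rw [← h.1]
      · rw [← h.2, dpost_map_fst]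
      · rw [← h.1]
        simp [min_comm]
    · simp only [List.cons_append, List.cons.injEq] at h
      obtain ⟨u'', e', v'', ht', hmu, he, hmv, hval⟩ := ih (min b.2 m) u₁ e v h.2
      refine ⟨b :: u'', e', v'', by simp [ht'], ?_, he, hmv, ?_⟩
      · simp only [List.map_cons, hmu, ← h.1]
      · rw [hval]
        simp [min_comm]

theorem dpow_mem (ps : List Int) : ∀ prev, ps.Pairwise (· ≤ ·) → (∀ p ∈ ps, prev ≤ p) →
    ∀ x, x ∈ dpow prev ps ↔ x ∈ ps ∧ prev < x := by
  induction ps with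
  | nil => intro prev _ _ x; simp [dpow]
  | cons p t ih =>
    intro prev hp hge x
    rw [List.pairwise_cons] at hp
    by_cases h : p = prev
    · subst h
      rw [dpow, if_neg (by simp)]
      rw [ih p hp.2 hp.1 x]
      constructor
      · rintro ⟨hx, hlt⟩; exact ⟨List.mem_cons_of_mem _ hx, hlt⟩
      · rintro ⟨hx, hlt⟩
        rcases List.mem_cons.mp hx with rfl | hx'
        · omega
        · exact ⟨hx', hlt⟩
    · have hplt : prev < p := lt_of_le_of_ne (hge p List.mem_cons_self) (Ne.symm h)
      rw [dpow, if_pos h]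
      rw [List.mem_cons, ih p hp.2 hp.1 x]
      constructor
      · rintro (rfl | ⟨hx, hlt⟩)
        · exact ⟨List.mem_cons_self, hplt⟩
        · exact ⟨List.mem_cons_of_mem _ hx, by omega⟩
      · rintro ⟨hx, hlt⟩
        rcases List.mem_cons.mp hx with rfl | hx'
        · exact Or.inl rfl
        · rcases eq_or_lt_of_le (hp.1 x hx') with rfl | hlt'
          · exact Or.inl rfl
          · exact Or.inr ⟨hx', hlt'⟩

theorem dpow_pairwise (ps : List Int) : ∀ prev, ps.Pairwise (· ≤ ·) → (∀ p ∈ ps, prev ≤ p) →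
    (dpow prev ps).Pairwise (· < ·) := by
  induction ps with
  | nil => intro prev _ _; simp [dpow]
  | cons p t ih =>
    intro prev hp hge
    rw [List.pairwise_cons] at hp
    by_cases h : p = prev
    · subst h; rw [dpow, if_neg (by simp)]; exact ih p hp.2 hp.1
    · rw [dpow, if_pos h]
      refine List.Pairwise.cons ?_ (ih p hp.2 hp.1)
      intro x hx
      exact ((dpow_mem t p hp.2 hp.1 x).mp hx).2

theorem dscan_spec (f : Int → Int) (l : List (Int × Int)) : ∀ (prev : Int),
    l.Pairwise (fun a b => a.1 ≤ b.1) →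
    (∀ e ∈ l, prev ≤ e.1) →
    (∀ u e v, l = u ++ e :: v → (∀ g ∈ u, g.1 < e.1) → prev < e.1 → e.2 = f e.1) →
    dscan prev l = (dpow prev (l.map Prod.fst)).map (fun p => (p, f p)) := by
  induction l with
  | nil => intro prev _ _ _; simp [dscan, dpow]
  | cons e t ih =>
    intro prev hpw hge hval
    rw [List.pairwise_cons] at hpw
    rw [List.map_cons, dscan, dpow]
    by_cases he : e.1 = prev
    · rw [if_neg (by simp [he]), if_neg (by simp [he])]
      refine ih prev hpw.2 (fun g hg => he ▸ hpw.1 g hg) ?_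
      intro u e' v ht hu hlt
      refine hval (e :: u) e' v (by simp [ht]) ?_ hlt
      intro g hg
      rcases List.mem_cons.mp hg with rfl | hg'
      · omega
      · exact hu g hg'
    · have hlt : prev < e.1 := lt_of_le_of_ne (hge e List.mem_cons_self) (Ne.symm he)
      rw [if_pos he, if_pos he, List.map_cons]
      have he2 : e.2 = f e.1 := hval [] e t (by simp) (by simp) hlt
      have hee : e = (e.1, f e.1) := by rw [← he2]
      rw [← hee]
      congr 1
      refine ih e.1 hpw.2 hpw.1 ?_
      intro u e' v ht hu hlt'
      refine hval (e :: u) e' v (by simp [ht]) ?_ (by omega)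
      intro g hg
      rcases List.mem_cons.mp hg with rfl | hg'
      · exact hlt'
      · exact hu g hg'

theorem sweep_spec (xs : List (Int × Int)) (g : Int → Int)
    (hg1 : ∀ p ∈ xs.map Prod.fst, ∃ e ∈ xs, e.1 = p ∧ g p = e.2)
    (hg2 : ∀ e ∈ xs, g e.1 ≤ e.2)
    (l : List Int) : ∀ (a : Int),
    l.Pairwise (fun a b => b < a) →
    (∀ p ∈ l, p ∈ xs.map Prod.fst) →
    (∀ k ∈ xs.map Prod.fst, k ∉ l → ∀ j ∈ l, j < k) →
    (l ≠ [] → ∃ e ∈ xs, e.1 ∉ l.tail ∧ a = e.2) →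
    (∀ e ∈ xs, e.1 ∉ l → a ≤ e.2) →
    sweepF g a l = l.map (fun q => (q, smv xs q)) := by
  induction l with
  | nil => intro a _ _ _ _ _; simp [sweepF]
  | cons q t ih =>
    intro a hpw hsub hext hmem hlb
    rw [List.pairwise_cons] at hpw
    have hqmem : q ∈ xs.map Prod.fst := hsub q List.mem_cons_self
    -- the new accumulator value
    set r := min a (g q) with hr
    -- r is the price of some entry with power ≥ q
    have hrmem : ∃ e ∈ xs, q ≤ e.1 ∧ r = e.2 := by
      obtain ⟨e₀, he₀, hn₀, ha₀⟩ := hmem (by simp)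
      obtain ⟨e₁, he₁, hf₁, hg₁⟩ := hg1 q hqmem
      rcases min_cases a (g q) with ⟨hmin, hle⟩ | ⟨hmin, hle⟩
      · refine ⟨e₀, he₀, ?_, by rw [hr, hmin, ha₀]⟩
        -- e₀.1 ∉ t; if e₀.1 = q done, else e₀.1 ∉ q :: t so q < e₀.1
        by_cases hq : e₀.1 = q
        · omega
        · have : e₀.1 ∉ q :: t := by
            intro hc; rcases List.mem_cons.mp hc with h | h
            · exact hq h
            · exact hn₀ (by simpa using h)
          have := hext e₀.1 (List.mem_map_of_mem he₀) this q List.mem_cons_self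
          omega
      · exact ⟨e₁, he₁, by omega, by rw [hr, hmin, hg₁]⟩
    -- r is ≤ every price of an entry with power ≥ q
    have hrlb : ∀ e ∈ xs, q ≤ e.1 → r ≤ e.2 := by
      intro e he hqe
      by_cases hq : e.1 = q
      · have := hg2 e he
        rw [hq] at this
        omega
      · have hnotl : e.1 ∉ q :: t := by
          intro hc
          rcases List.mem_cons.mp hc with h | h
          · exact hq h
          · have := hpw.1 e.1 h; omega
        have := hlb e he hnotl
        omega
    have hsmv : r = smv xs q := by
      obtain ⟨e, he, hqe, hre⟩ := hrmem
      obtain ⟨e', he', hqe', hse⟩ := smv_mem xs q ⟨e, he, hqe⟩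
      have h1 : r ≤ e'.2 := hrlb e' he' hqe'
      have h2 : smv xs q ≤ e.2 := smv_le xs q e he hqe
      omega
    rw [sweepF, List.map_cons, ← hr]
    refine congrArg₂ _ (by rw [hsmv]) ?_
    -- recurse
    refine ih r hpw.2 (fun p hp => hsub p (List.mem_cons_of_mem _ hp)) ?_ ?_ ?_
    · intro k hk hkt j hj
      by_cases hkl : k ∈ q :: t
      · rcases List.mem_cons.mp hkl with rfl | h
        · exact hpw.1 j hj
        · exact absurd h hkt
      · exact hext k hk hkl j (List.mem_cons_of_mem _ hj)
    · intro hne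
      obtain ⟨e, he, hqe, hre⟩ := hrmem
      refine ⟨e, he, ?_, hre⟩
      intro hc
      have : e.1 ∈ t := by
        rcases t with _ | ⟨t0, t1⟩
        · exact absurd hc (List.not_mem_nil)
        · exact List.mem_cons_of_mem _ hc
      have := hpw.1 e.1 this
      omega
    · intro e he hnt
      by_cases hq : e.1 = q
      · exact hrlb e he (le_of_eq hq.symm)
      · have : e.1 ∉ q :: t := by
          intro hc; rcases List.mem_cons.mp hc with h | h
          · exact hq h
          · exact hnt h
        have := hlb e he this
        omega

def bstep (d : PySem.Dict Int Int) (e : Int × Int) : PySem.Dict Int Int :=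
  if !d.contains e.1 || e.2 < d.getD e.1 0 then d.insert e.1 e.2 else d

def bestd (xs : List (Int × Int)) : PySem.Dict Int Int := xs.foldl bstep PySem.Dict.empty

theorem bestd_contains (xs : List (Int × Int)) :
    ∀ p, (bestd xs).contains p = true ↔ p ∈ xs.map Prod.fst := by
  induction xs using List.reverseRecOn with
  | nil => intro p; simp [bestd, PySem.Dict.contains_empty]
  | append_singleton t e ih =>
    intro p
    have : bestd (t ++ [e]) = bstep (bestd t) e := by simp [bestd, List.foldl_append]
    rw [this, bstep]
    by_cases hc : (!(bestd t).contains e.1 || e.2 < (bestd t).getD e.1 0) = true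
    · rw [if_pos hc, PySem.Dict.contains_insert]
      simp only [List.map_append, List.map_cons, List.map_nil, List.mem_append, Bool.or_eq_true,
        beq_iff_eq, ih p, List.mem_cons, List.not_mem_nil, or_false]
      tauto
    · rw [if_neg hc]
      have hcont : (bestd t).contains e.1 = true :=
        ((by simpa using hc : (bestd t).contains e.1 = true ∧ (bestd t).getD e.1 0 ≤ e.2)).1
      simp only [List.map_append, List.map_cons, List.map_nil, List.mem_append, List.mem_cons,
        List.not_mem_nil, or_false, ih p]
      constructor
      · exact Or.inl
      · rintro (h | h)
        · exact h
        · rw [h]; exact (ih e.1).mp hcont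

theorem bestd_le (xs : List (Int × Int)) : ∀ e ∈ xs, (bestd xs).getD e.1 0 ≤ e.2 := by
  induction xs using List.reverseRecOn with
  | nil => intro e he; simp at he
  | append_singleton t e ih =>
    intro f hf
    have hstep : bestd (t ++ [e]) = bstep (bestd t) e := by simp [bestd, List.foldl_append]
    rw [hstep, bstep]
    by_cases hc : (!(bestd t).contains e.1 || e.2 < (bestd t).getD e.1 0) = true
    · rw [if_pos hc, PySem.Dict.getD_insert]
      rcases List.mem_append.mp hf with hft | hfe
      · by_cases hfe1 : f.1 = e.1
        · rw [if_pos hfe1]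
          -- e.2 < old value at e.1 (contains must hold since f ∈ t with f.1 = e.1)
          have hcont : (bestd t).contains e.1 = true := by
            rw [bestd_contains t e.1, ← hfe1]
            exact List.mem_map_of_mem hft
          rcases Bool.or_eq_true_iff.mp hc with h1 | h2
          · rw [hcont] at h1; simp at h1
          · have h2' : e.2 < (bestd t).getD e.1 0 := by simpa using h2
            have := ih f hft
            rw [hfe1] at this
            omega
        · rw [if_neg hfe1]; exact ih f hft
      · have : f = e := by simpa using hfe
        subst this
        simp
    · rw [if_neg hc]
      rcases List.mem_append.mp hf with hft | hfe
      · exact ih f hft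
      · have : f = e := by simpa using hfe
        subst this
        exact ((by simpa using hc : (bestd t).contains f.1 = true ∧ (bestd t).getD f.1 0 ≤ f.2)).2

theorem bestd_mem (xs : List (Int × Int)) :
    ∀ p ∈ xs.map Prod.fst, ∃ e ∈ xs, e.1 = p ∧ (bestd xs).getD p 0 = e.2 := by
  induction xs using List.reverseRecOn with
  | nil => intro p hp; simp at hp
  | append_singleton t e ih =>
    intro p hp
    have hstep : bestd (t ++ [e]) = bstep (bestd t) e := by simp [bestd, List.foldl_append]
    rw [hstep, bstep]
    by_cases hc : (!(bestd t).contains e.1 || e.2 < (bestd t).getD e.1 0) = true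
    · rw [if_pos hc]
      by_cases hpe : p = e.1
      · subst hpe
        exact ⟨e, by simp, rfl, by rw [PySem.Dict.getD_insert, if_pos rfl]⟩
      · have hpt : p ∈ t.map Prod.fst := by
          rw [List.map_append] at hp
          rcases List.mem_append.mp hp with h | h
          · exact h
          · have : p = e.1 := by simpa using h
            exact absurd this hpe
        obtain ⟨f, hf, hfp, hv⟩ := ih p hpt
        exact ⟨f, List.mem_append_left _ hf, hfp, by rw [PySem.Dict.getD_insert, if_neg hpe, hv]⟩
    · rw [if_neg hc]
      by_cases hpe : p = e.1
      · subst hpe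
        have hcont : (bestd t).contains e.1 = true :=
          ((by simpa using hc : (bestd t).contains e.1 = true ∧ (bestd t).getD e.1 0 ≤ e.2)).1
        obtain ⟨f, hf, hfp, hv⟩ := ih e.1 ((bestd_contains t e.1).mp hcont)
        exact ⟨f, List.mem_append_left _ hf, hfp, hv⟩
      · have hpt : p ∈ t.map Prod.fst := by
          rw [List.map_append] at hp
          rcases List.mem_append.mp hp with h | h
          · exact h
          · have : p = e.1 := by simpa using h
            exact absurd this hpe
        obtain ⟨f, hf, hfp, hv⟩ := ih p hpt
        exact ⟨f, List.mem_append_left _ hf, hfp, hv⟩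

theorem lemA (xs : List (Int × Int)) (hne : xs ≠ []) :
    preprocessed xs
      = (PySem.List.sorted (PySem.Set.ofList (xs.map Prod.fst)) (fun p => p) false).map
          (fun p => (p, smv xs p)) := by
  -- facts about the descending sort s1
  have hs1perm : (PySem.List.sorted2 xs Prod.fst Prod.snd true).Perm xs :=
    PySem.List.sorted2_perm xs Prod.fst Prod.snd true
  have hs1pw : (PySem.List.sorted2 xs Prod.fst Prod.snd true).Pairwise
      (fun a b => pltB a b = false) := by
    rw [sorted2_desc_eq]
    exact foldl_insertBy_pairwise (fun a b => pltB b a)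
      (fun x y h => pltB_asym y x h) (fun x y z h1 h2 => pltB_flip_trans' x y z h1 h2)
      xs [] (by simp)
  have hs1ne : PySem.List.sorted2 xs Prod.fst Prod.snd true ≠ [] := by
    intro h
    exact hne ((h ▸ hs1perm).symm.eq_nil)
  rcases hS1 : PySem.List.sorted2 xs Prod.fst Prod.snd true with _ | ⟨hd, tl⟩
  · exact absurd hS1 hs1ne
  rw [hS1] at hs1perm hs1pw
  -- the index loop computes dpost
  have hlen : PySem.List.len (hd :: tl)
      = ((([] : List (Int × Int)).length : Int) + 1) + (tl.length : Int) := by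
    simp [PySem.List.len]; omega
  have hloop : (PySem.List.pyRange 1 (PySem.List.len (hd :: tl))).foldl
      (fun l i =>
        match PySem.List.pyGet? l i, PySem.List.pyGet? l (i - 1) with
        | some cur, some prev => l.set i.toNat (cur.1, min cur.2 prev.2)
        | _, _ => l) (hd :: tl)
      = hd :: dpost hd.2 tl := by
    have h1 : (1 : Int) = (([] : List (Int × Int)).length : Int) + 1 := by simp
    rw [hlen, h1]
    exact loopA_eq tl [] hd
  -- properties of zs = hd :: dpost hd.2 tl
  rw [List.pairwise_cons] at hs1pw
  have htl_fstge : tl.Pairwise (fun a b => b.1 ≤ a.1) :=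
    hs1pw.2.imp (fun h => pltB_false_fst _ _ h)
  have hzs_pw : (hd :: dpost hd.2 tl).Pairwise (fun a b => pltB a b = false) := by
    refine List.Pairwise.cons ?_ (dpost_pairwise tl hd.2 htl_fstge)
    intro e he
    refine pltB_false_of _ _ ?_ (dpost_snd_le tl hd.2 e he)
    have : e.1 ∈ (dpost hd.2 tl).map Prod.fst := List.mem_map_of_mem he
    rw [dpost_map_fst] at this
    obtain ⟨g, hg, hge⟩ := List.mem_map.mp this
    rw [← hge]
    exact pltB_false_fst _ _ (hs1pw.1 g hg)
  -- the ascending sort of zs is its reverse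
  have hs3 : PySem.List.sorted2 (hd :: dpost hd.2 tl) Prod.fst Prod.snd false
      = (hd :: dpost hd.2 tl).reverse := by
    refine asc_unique _ _ ?_ ?_ ?_
    · exact (PySem.List.sorted2_perm _ _ _ _).trans (List.reverse_perm _).symm
    · rw [sorted2_asc_eq]
      exact foldl_insertBy_pairwise pltB (fun x y h => pltB_asym x y h)
        (fun x y z h1 h2 => pltB_trans' x y z h1 h2) _ [] (by simp)
    · rw [List.pairwise_reverse]
      exact hzs_pw
  rcases hW : (hd :: dpost hd.2 tl).reverse with _ | ⟨w0, wt⟩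
  · exact absurd hW (by simp)
  rw [hW] at hs3
  -- membership transfer: elements of zs come from s1 up to fst/snd bookkeeping
  have hmem_s1 : ∀ e, e ∈ hd :: tl → e ∈ xs := fun e he => hs1perm.subset he
  -- the Z property: a first-of-its-power element of W has the suffix-min price
  have hZ : ∀ u e v, w0 :: wt = u ++ e :: v → (∀ g ∈ u, g.1 < e.1) → e.2 = smv xs e.1 := by
    intro u e v hsplit hu
    have hzs_eq : hd :: dpost hd.2 tl = v.reverse ++ e :: u.reverse := by
      have := congrArg List.reverse hW
      rw [List.reverse_reverse, hsplit] at this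
      rw [this]
      simp
    rcases hvr : v.reverse with _ | ⟨c, vr'⟩
    · -- e is the head hd
      rw [hvr, List.nil_append] at hzs_eq
      obtain ⟨hhd, hur⟩ : hd = e ∧ dpost hd.2 tl = u.reverse := by
        refine ⟨?_, ?_⟩ <;> injection hzs_eq
      replace hur := hur.symm
      obtain ⟨f, hf, hfe, hsmv⟩ := smv_mem xs e.1 ⟨e, hhd ▸ hmem_s1 hd List.mem_cons_self, le_refl _⟩
      have hf_s1 : f ∈ hd :: tl := (hs1perm.mem_iff).mpr hf
      rcases List.mem_cons.mp hf_s1 with rfl | hf_tl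
      · rw [hsmv, ← hhd]
      · exfalso
        have : f.1 ∈ tl.map Prod.fst := List.mem_map_of_mem hf_tl
        rw [← dpost_map_fst tl hd.2, ← hur] at this
        obtain ⟨g, hg, hge⟩ := List.mem_map.mp this
        have := hu g (List.mem_reverse.mp hg)
        omega
    · -- e is inside dpost
      rw [hvr] at hzs_eq
      have hhd : hd = c := by
        have := congrArg (·.headI) hzs_eq
        simpa using this
      have hdp : dpost hd.2 tl = vr' ++ e :: u.reverse := by
        have := congrArg List.tail hzs_eq
        simpa using this
      obtain ⟨u', e', v', htl, hmu, he1, hmv, hval⟩ := dpost_split tl hd.2 vr' e u.reverse hdp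
      -- (a) e.2 ≤ smv xs e.1
      have hva : e.2 ≤ smv xs e.1 := by
        have he'xs : e' ∈ xs := hmem_s1 e' (List.mem_cons_of_mem _ (htl ▸ List.mem_append_right _ List.mem_cons_self))
        obtain ⟨f, hf, hfe, hsmv⟩ := smv_mem xs e.1 ⟨e', he'xs, le_of_eq he1.symm⟩
        have hf_s1 : f ∈ hd :: tl := (hs1perm.mem_iff).mpr hf
        rw [htl] at hf_s1
        have hf_pre : f = hd ∨ f ∈ u' ++ [e'] := by
          rcases List.mem_cons.mp hf_s1 with rfl | hf'
          · exact Or.inl rfl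
          · rcases List.mem_append.mp hf' with h | h
            · exact Or.inr (List.mem_append_left _ h)
            · rcases List.mem_cons.mp h with rfl | hfv
              · exact Or.inr (List.mem_append_right _ List.mem_cons_self)
              · exfalso
                have : f.1 ∈ v'.map Prod.fst := List.mem_map_of_mem hfv
                rw [hmv] at this
                obtain ⟨g, hg, hge⟩ := List.mem_map.mp this
                have := hu g (List.mem_reverse.mp hg)
                omega
        rw [hsmv, hval]
        rcases hf_pre with rfl | hf'
        · exact (PySem.List.foldl_min_le _ _).1
        · exact (PySem.List.foldl_min_le _ _).2 f.2 (List.mem_map_of_mem hf')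
      -- (b) smv xs e.1 ≤ e.2
      have hvb : smv xs e.1 ≤ e.2 := by
        have hmm := PySem.List.foldl_min_mem ((u' ++ [e']).map Prod.snd) hd.2
        rw [← hval] at hmm
        have : ∃ c₀, c₀ ∈ hd :: (u' ++ [e']) ∧ e.2 = c₀.2 := by
          rcases hmm with h | h
          · exact ⟨hd, List.mem_cons_self, h⟩
          · obtain ⟨c₀, hc₀, hce⟩ := List.mem_map.mp h
            exact ⟨c₀, List.mem_cons_of_mem _ hc₀, hce.symm⟩
        obtain ⟨c₀, hc₀, hce⟩ := this
        have hc₀s1 : c₀ ∈ hd :: tl := by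
          rcases List.mem_cons.mp hc₀ with rfl | h
          · exact List.mem_cons_self
          · rcases List.mem_append.mp h with h' | h'
            · exact List.mem_cons_of_mem _ (htl ▸ List.mem_append_left _ h')
            · have : c₀ = e' := by simpa using h'
              subst this
              exact List.mem_cons_of_mem _ (htl ▸ List.mem_append_right _ List.mem_cons_self)
        have hfst : e.1 ≤ c₀.1 := by
          rcases List.mem_cons.mp hc₀ with rfl | h
          · -- c₀ = hd: hd related to e' via pairwise
            have : pltB c₀ e' = false := hs1pw.1 e' (htl ▸ List.mem_append_right _ List.mem_cons_self)
            have := pltB_false_fst _ _ this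
            omega
          · rcases List.mem_append.mp h with h' | h'
            · -- c₀ ∈ u': before e' in tl
              have htl_pw : tl.Pairwise (fun a b => pltB a b = false) := hs1pw.2
              rw [htl] at htl_pw
              have := (List.pairwise_append.mp htl_pw).2.2 c₀ h' e' List.mem_cons_self
              have := pltB_false_fst _ _ this
              omega
            · have : c₀ = e' := by simpa using h'
              subst this
              omega
        rw [hce]
        exact smv_le xs e.1 c₀ ((hs1perm.mem_iff).mp hc₀s1) hfst
      omega
  -- now reduce the port
  unfold preprocessed
  rw [hS1]
  simp only [hloop, hs3]
  rw [show (((w0 :: wt).foldl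
        (fun (st : List (Int × Int) × Int) e =>
          if e.1 ≠ st.2 then (st.1 ++ [e], e.1) else st)
        ([w0], w0.1)).1) = [w0] ++ dscan w0.1 (w0 :: wt) from loopScan_eq (w0 :: wt) [w0] w0.1]
  rw [show dscan w0.1 (w0 :: wt) = dscan w0.1 wt by rw [dscan, if_neg (by simp)]]
  -- W's pairwise facts
  have hWpw : (w0 :: wt).Pairwise (fun a b => pltB b a = false) := by
    rw [← hW, List.pairwise_reverse]
    exact hzs_pw
  have hWfst : (w0 :: wt).Pairwise (fun a b => a.1 ≤ b.1) :=
    hWpw.imp (fun h => pltB_false_fst _ _ h)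
  rw [List.pairwise_cons] at hWfst
  rw [dscan_spec (smv xs) wt w0.1 hWfst.2 hWfst.1 ?_]
  swap
  · intro u e v hsplit hu hlt
    refine hZ (w0 :: u) e v (by rw [hsplit]; simp) ?_
    intro g hg
    rcases List.mem_cons.mp hg with rfl | hg'
    · exact hlt
    · exact hu g hg'
  -- assemble the final list
  have hw0 : w0 = (w0.1, smv xs w0.1) := by
    have := hZ [] w0 wt (by simp) (by simp)
    rw [← this]
  have hfinal : [w0] ++ (dpow w0.1 (wt.map Prod.fst)).map (fun p => (p, smv xs p))
      = (w0.1 :: dpow w0.1 (wt.map Prod.fst)).map (fun p => (p, smv xs p)) := by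
    rw [List.map_cons]
    rw [← hw0]
    rfl
  rw [hfinal]
  congr 1
  -- the power list is the ascending sorted distinct power list
  have hwt_fst_pw : (wt.map Prod.fst).Pairwise (· ≤ ·) := List.pairwise_map.mpr hWfst.2
  have hwt_fst_ge : ∀ p ∈ wt.map Prod.fst, w0.1 ≤ p := by
    intro p hp
    obtain ⟨g, hg, hge⟩ := List.mem_map.mp hp
    rw [← hge]
    exact hWfst.1 g hg
  refine sortedLt_eq _ _ ?_ ?_ ?_
  · refine List.Pairwise.cons ?_ (dpow_pairwise _ _ hwt_fst_pw hwt_fst_ge)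
    intro x hx
    exact ((dpow_mem _ _ hwt_fst_pw hwt_fst_ge x).mp hx).2
  · exact PySem.List.sorted_ofList_pairwise_lt (xs.map Prod.fst)
  · intro x
    rw [List.mem_cons, dpow_mem _ _ hwt_fst_pw hwt_fst_ge x]
    rw [(PySem.List.sorted_perm (PySem.Set.ofList (xs.map Prod.fst)) (fun p => p) false).mem_iff,
      PySem.Set.mem_ofList]
    have hmapW : ∀ y, y ∈ (w0 :: wt).map Prod.fst ↔ y ∈ xs.map Prod.fst := by
      intro y
      rw [← hW]
      rw [List.map_reverse, List.mem_reverse]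
      have : (hd :: dpost hd.2 tl).map Prod.fst = (hd :: tl).map Prod.fst := by
        rw [List.map_cons, List.map_cons, dpost_map_fst]
      rw [this]
      exact (hs1perm.map Prod.fst).mem_iff
    constructor
    · rintro (rfl | ⟨hx, _⟩)
      · exact (hmapW w0.1).mp (by simp)
      · exact (hmapW x).mp (by simp [hx])
    · intro hx
      rcases List.mem_cons.mp ((hmapW x).mpr hx) with h | h
      · exact Or.inl h
      · by_cases hx0 : x = w0.1
        · exact Or.inl hx0
        · exact Or.inr ⟨h, lt_of_le_of_ne (hwt_fst_ge x h) (Ne.symm hx0)⟩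

theorem lemB (xs : List (Int × Int)) (hne : xs ≠ []) :
    preprocessed_alt xs
      = (PySem.List.sorted (PySem.Set.ofList (xs.map Prod.fst)) (fun p => p) false).map
          (fun p => (p, smv xs p)) := by
  have hDperm := PySem.List.sorted_perm (PySem.Set.ofList (xs.map Prod.fst)) (fun p => p) true
  have hDnodup := hDperm.symm.nodup (PySem.Set.nodup_ofList (xs.map Prod.fst))
  have hDge := PySem.List.sorted_pairwise_rev (PySem.Set.ofList (xs.map Prod.fst)) (fun p => p)
  have hDgt : (PySem.List.sorted (PySem.Set.ofList (xs.map Prod.fst)) (fun p => p) true).Pairwise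
      (fun a b => b < a) :=
    (hDge.and hDnodup).imp (fun h => lt_of_le_of_ne h.1 (Ne.symm h.2))
  have hDmem : ∀ x, x ∈ PySem.List.sorted (PySem.Set.ofList (xs.map Prod.fst)) (fun p => p) true
      ↔ x ∈ xs.map Prod.fst := by
    intro x
    rw [hDperm.mem_iff, PySem.Set.mem_ofList]
  have hDne : PySem.List.sorted (PySem.Set.ofList (xs.map Prod.fst)) (fun p => p) true ≠ [] := by
    rw [Ne, PySem.List.sorted_eq_nil_iff]
    intro h
    rcases xs with _ | ⟨x, t⟩
    · exact hne rfl
    · have : x.1 ∈ PySem.Set.ofList ((x :: t).map Prod.fst) := by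
        rw [PySem.Set.mem_ofList]; exact List.mem_map_of_mem List.mem_cons_self
      rw [h] at this
      exact absurd this (List.not_mem_nil)
  rcases hD3 : PySem.List.sorted (PySem.Set.ofList (xs.map Prod.fst)) (fun p => p) true
    with _ | ⟨p0, t⟩
  · exact absurd hD3 hDne
  rw [hD3] at hDgt hDmem
  unfold preprocessed_alt
  rw [show (xs.foldl
      (fun (d : PySem.Dict Int Int) e =>
        if !d.contains e.1 || e.2 < d.getD e.1 0 then d.insert e.1 e.2 else d)
      PySem.Dict.empty) = bestd xs from rfl]
  simp only [hD3]
  have hstep : (fun (st : List (Int × Int) × Int) p =>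
            let r := min st.2 ((bestd xs).getD p 0)
            (st.1 ++ [(p, r)], r))
        = (fun (st : List (Int × Int) × Int) p =>
            (st.1 ++ [(p, min st.2 ((bestd xs).getD p 0))], min st.2 ((bestd xs).getD p 0))) := rfl
  rw [hstep, loopSweep_eq (fun p => (bestd xs).getD p 0) (p0 :: t) [] ((bestd xs).getD p0 0),
    List.nil_append]
  have hsw : sweepF (fun p => (bestd xs).getD p 0) ((bestd xs).getD p0 0) (p0 :: t)
      = (p0 :: t).map (fun q => (q, smv xs q)) := by
    refine sweep_spec xs _ (fun p hp => bestd_mem xs p hp) (bestd_le xs) (p0 :: t) _ hDgt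
      (fun p hp => (hDmem p).mp hp) ?_ ?_ ?_
    · intro k hk hknl j hj
      exact absurd ((hDmem k).mpr hk) hknl
    · intro _
      have hp0 : p0 ∈ xs.map Prod.fst := (hDmem p0).mp List.mem_cons_self
      obtain ⟨e, he, he1, hv⟩ := bestd_mem xs p0 hp0
      refine ⟨e, he, ?_, hv⟩
      rw [he1]
      intro hc
      rw [List.pairwise_cons] at hDgt
      exact absurd (hDgt.1 p0 hc) (by omega)
    · intro e he hnl
      exact absurd ((hDmem e.1).mpr (List.mem_map_of_mem he)) hnl
  rw [hsw, ← List.map_reverse]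
  congr 1
  refine sortedLt_eq _ _ ?_ ?_ ?_
  · rw [List.pairwise_reverse]; exact hDgt
  · exact PySem.List.sorted_ofList_pairwise_lt (xs.map Prod.fst)
  · intro x
    rw [List.mem_reverse, hDmem x,
      (PySem.List.sorted_perm (PySem.Set.ofList (xs.map Prod.fst)) (fun p => p) false).mem_iff,
      PySem.Set.mem_ofList]

-- ===== VERDICT (by name: the statement is the Claim_ definition above) =====
theorem preprocessed_spec : Claim_equal_preprocessed := by
  intro xs _ hpre
  unfold Spec_preprocessed
  rw [lemA xs hpre, lemB xs hpre]
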